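-- pv_equiv track=rewrite | github.com/anhquanhus0902/HaL | HaL6/algorithm-design-and-analysis/Hw5_19000470_PhamVuAnhQuan/src/StringMatching.py | solve
-- ===== SOURCE A (Python) =====
-- from typing import List, Tuple
--
-- def solve(textData: List[str], pattern: str) -> Tuple[int, int]:
--     lenOfTextData = len(textData)
--     m = len(pattern)
--     for i in range(lenOfTextData):
--         n = len(textData[i])
--         for j in range(n-m+1):
--             k = 0
--             while k < m and pattern[k] == textData[i][j+k]:
--                 k += 1
--             if k == m:
--                 return (j+1, i+1)
--     return (-1, -1)
-- ===== SOURCE B (Python) =====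
-- def solve(textData, pattern):
--     B = 256
--     P = 1000000007
--     m = len(pattern)
--     hp = 0
--     for c in pattern:
--         hp = (hp * B + ord(c)) % P
--     pw = pow(B, m - 1, P) if m > 0 else 1
--     for i, line in enumerate(textData):
--         n = len(line)
--         if m > n:
--             continue
--         h = 0
--         for c in line[:m]:
--             h = (h * B + ord(c)) % P
--         for j in range(n - m + 1):
--             if h == hp and line[j:j + m] == pattern:
--                 return (j + 1, i + 1)
--             if j + m < n:
--                 h = ((h - ord(line[j]) * pw) * B + ord(line[j + m])) % P
--     return (-1, -1)
-- ===== Notes on version B (the rewrite author's own statement) =====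
-- stated objective: alternative
-- what changed: Replaces A's per-position character-by-character comparison with Rabin-Karp rolling-hash matching: each line's window hash is updated in O(1) per shift and the full comparison runs only on a hash hit.
import Mathlib
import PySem

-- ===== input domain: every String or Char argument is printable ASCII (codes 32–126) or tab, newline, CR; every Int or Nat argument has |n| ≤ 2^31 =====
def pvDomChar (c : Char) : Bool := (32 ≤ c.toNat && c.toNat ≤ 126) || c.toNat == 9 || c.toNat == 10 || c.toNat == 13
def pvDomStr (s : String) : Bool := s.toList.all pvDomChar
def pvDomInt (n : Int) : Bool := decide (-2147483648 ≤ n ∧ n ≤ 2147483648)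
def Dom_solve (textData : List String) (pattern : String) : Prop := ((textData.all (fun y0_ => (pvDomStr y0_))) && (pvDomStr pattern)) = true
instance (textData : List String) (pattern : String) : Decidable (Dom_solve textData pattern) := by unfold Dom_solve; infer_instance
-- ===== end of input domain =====

-- B replaces A's per-position character-by-character scan with Rabin–Karp rolling-hash matching
-- (full comparison only on a hash hit); return values proved equal.

-- ===== PORT A =====
-- while k < m and pattern[k] == textData[i][j+k]: k += 1   (indices always in range when called from jLoopA)
def kLoopA (p t : List Char) (j k : Nat) : Nat :=
  if _h : k < p.length then
    if p.getD k ' ' = t.getD (j + k) ' ' then kLoopA p t j (k + 1) else k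
  else k
termination_by p.length - k

-- for j in range(n-m+1): k = 0; while …; if k == m: return j   (range(n-m+1) = List.range (n+1-m) in Nat)
def jLoopA (p t : List Char) : List Nat → Option Nat
  | [] => none
  | j :: rest => if kLoopA p t j 0 = p.length then some j else jLoopA p t rest

-- for i in range(lenOfTextData): … return (j+1, i+1) on the first match
def iLoopA (lines : List (List Char)) (p : List Char) (i : Nat) : Int × Int :=
  match lines with
  | [] => (-1, -1)
  | t :: rest =>
    match jLoopA p t (List.range (t.length + 1 - p.length)) with
    | some j => ((j : Int) + 1, (i : Int) + 1)
    | none => iLoopA rest p (i + 1)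

def solve (textData : List String) (pattern : String) : Int × Int :=
  iLoopA (textData.map String.toList) pattern.toList 0

-- ===== PORT B =====
-- h = (h * B + ord(c)) % P
def hstep (h : Int) (c : Char) : Int := PySem.Int.mod (h * 256 + (c.toNat : Int)) 1000000007

-- for j in range(n-m+1): if h == hp and line[j:j+m] == pattern: return j; if j+m < n: slide h
def rkLoop (t p : List Char) (hp pw : Int) (h : Int) (j : Nat) : Nat → Option Nat
  | 0 => none
  | cnt + 1 =>
    if h = hp ∧ PySem.List.slice t (some (j : Int)) (some ((j : Int) + (p.length : Int))) = p then
      some j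
    else
      rkLoop t p hp pw
        (if j + p.length < t.length then
          PySem.Int.mod ((h - ((t.getD j ' ').toNat : Int) * pw) * 256
            + ((t.getD (j + p.length) ' ').toNat : Int)) 1000000007
        else h)
        (j + 1) cnt

-- for i, line in enumerate(textData): if m > n: continue; h = hash(line[:m]); inner j loop
def iLoopB (p : List Char) (hp pw : Int) : List (List Char) → Nat → Int × Int
  | [], _ => (-1, -1)
  | t :: rest, i =>
    if p.length > t.length then iLoopB p hp pw rest (i + 1)
    else
      match rkLoop t p hp pw ((PySem.List.slice t none (some ((p.length : Nat) : Int))).foldl hstep 0)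
          0 (t.length - p.length + 1) with
      | some j => ((j : Int) + 1, (i : Int) + 1)
      | none => iLoopB p hp pw rest (i + 1)

def solve_alt (textData : List String) (pattern : String) : Int × Int :=
  let p := pattern.toList
  let hp := p.foldl hstep 0
  let pw := if 0 < p.length then PySem.Int.powMod 256 (p.length - 1) 1000000007 else 1
  iLoopB p hp pw (textData.map String.toList) 0

-- ===== PRECONDITION & SPEC =====
def Spec_solve (textData : List String) (pattern : String) (out : Int × Int) : Prop := out = solve_alt textData pattern
instance (textData : List String) (pattern : String) (out : Int × Int) : Decidable (Spec_solve textData pattern out) := by unfold Spec_solve; infer_instance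

-- ===== CLAIM (what is proved, stated in full; the proofs are below) =====
def Claim_equal_solve : Prop := ∀ (textData : List String) (pattern : String), Dom_solve textData pattern → Spec_solve textData pattern (solve textData pattern)

-- ===== LEMMAS AND PROOFS =====

-- the unreduced polynomial hash (proof-only spec of the rolling hash)
def hraw (a : Int) (cs : List Char) : Int := cs.foldl (fun a c => a * 256 + (c.toNat : Int)) a

theorem hstep_eq (h : Int) (c : Char) :
    hstep h c = (h * 256 + (c.toNat : Int)) % 1000000007 := by
  simp [hstep]

theorem foldl_hstep_mod (cs : List Char) (h : Int) :
    cs.foldl hstep (h % 1000000007) = hraw h cs % 1000000007 := by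
  induction cs generalizing h with
  | nil => rfl
  | cons c cs ih =>
    have : hstep (h % 1000000007) c = (h * 256 + (c.toNat : Int)) % 1000000007 := by
      rw [hstep_eq]
      exact (Int.ModEq.add_right _ (Int.ModEq.mul_right 256 (Int.emod_emod_of_dvd h dvd_rfl)))
    simp only [List.foldl_cons, this, ih (h * 256 + (c.toNat : Int))]
    rfl

theorem foldl_hstep_zero (cs : List Char) :
    cs.foldl hstep 0 = hraw 0 cs % 1000000007 := by
  have := foldl_hstep_mod cs 0
  simpa using this

theorem hraw_shift (u : List Char) (a : Int) :
    hraw a u = a * 256 ^ u.length + hraw 0 u := by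
  induction u generalizing a with
  | nil => simp [hraw]
  | cons c u ih =>
    simp only [hraw, List.foldl_cons, List.length_cons] at *
    rw [ih (a * 256 + (c.toNat : Int)), ih ((0:Int) * 256 + (c.toNat : Int))]
    ring

theorem hraw_append_singleton (u : List Char) (d : Char) :
    hraw 0 (u ++ [d]) = hraw 0 u * 256 + (d.toNat : Int) := by
  simp [hraw, List.foldl_append]

-- the O(1) hash slide recomputes the hash of the next window
theorem slide_eq (t : List Char) (m j : Nat) (h : Int)
    (h1 : j + m < t.length) (h2 : 1 ≤ m)
    (hh : h = hraw 0 ((t.drop j).take m) % 1000000007) :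
    ((h - ((t.getD j ' ').toNat : Int) * ((256 ^ (m - 1) : Int) % 1000000007)) * 256
        + ((t.getD (j + m) ' ').toNat : Int)) % 1000000007
      = hraw 0 ((t.drop (j + 1)).take m) % 1000000007 := by
  have hjlt : j < t.length := by omega
  have hjm : j + m < t.length := h1
  -- decompose the windows
  have hdropj : t.drop j = t[j] :: t.drop (j + 1) := List.drop_eq_getElem_cons hjlt
  obtain ⟨m', rfl⟩ : ∃ m', m = m' + 1 := ⟨m - 1, by omega⟩
  have hwin : (t.drop j).take (m' + 1) = t[j] :: (t.drop (j + 1)).take m' := by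
    rw [hdropj, List.take_succ_cons]
  have hulen : ((t.drop (j + 1)).take m').length = m' := by
    rw [List.length_take, List.length_drop]; omega
  have hnext : (t.drop (j + 1)).take (m' + 1)
      = (t.drop (j + 1)).take m' ++ [t[j + 1 + m']'(by omega)] := by
    rw [List.take_add_one, List.getElem?_drop, List.getElem?_eq_getElem (by omega : j + 1 + m' < t.length)]
    rfl
  have hgj : t.getD j ' ' = t[j] := List.getD_eq_getElem t ' ' hjlt
  have hgd : t.getD (j + (m' + 1)) ' ' = t[j + 1 + m']'(by omega) := by
    rw [List.getD_eq_getElem t ' ' (by omega : j + (m' + 1) < t.length)]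
    congr 1; omega
  set u := (t.drop (j + 1)).take m' with hu
  set c : Int := (t[j].toNat : Int)
  set d : Int := ((t[j + 1 + m']'(by omega)).toNat : Int)
  have hX : hraw 0 ((t.drop j).take (m' + 1)) = c * 256 ^ m' + hraw 0 u := by
    rw [hwin]
    show hraw 0 (t[j] :: u) = _
    have : hraw 0 (t[j] :: u) = hraw ((0:Int) * 256 + c) u := rfl
    rw [this, hraw_shift, hulen]; ring
  have hY : hraw 0 ((t.drop (j + 1)).take (m' + 1)) = hraw 0 u * 256 + d := by
    rw [hnext, hraw_append_singleton]
  rw [hY, hgj, hgd]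
  -- congruence modulo P
  have hmodh : Int.ModEq 1000000007 h (hraw 0 ((t.drop j).take (m' + 1))) := by
    rw [hh]; exact Int.emod_emod_of_dvd _ dvd_rfl
  have hmodp : Int.ModEq 1000000007 ((256 ^ ((m' + 1) - 1) : Int) % 1000000007) (256 ^ m') := by
    show (256 ^ ((m' + 1) - 1) : Int) % 1000000007 % 1000000007 = (256 : Int) ^ m' % 1000000007
    rw [Nat.add_sub_cancel]
    exact Int.emod_emod_of_dvd _ dvd_rfl
  have : Int.ModEq 1000000007
      ((h - c * ((256 ^ ((m' + 1) - 1) : Int) % 1000000007)) * 256 + d)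
      ((hraw 0 ((t.drop j).take (m' + 1)) - c * 256 ^ m') * 256 + d) :=
    Int.ModEq.add_right d (Int.ModEq.mul_right 256 (Int.ModEq.sub hmodh (Int.ModEq.mul_left c hmodp)))
  rw [this]
  congr 1
  rw [hX]; ring

-- A's inner while-loop reaches m exactly when p (from position k) is a prefix of t.drop (j+k)
theorem kLoopA_eq_length_iff (p t : List Char) (j : Nat) (k : Nat)
    (hk : k ≤ p.length) (hlen : j + p.length ≤ t.length) :
    kLoopA p t j k = p.length ↔ p.drop k <+: t.drop (j + k) := by
  fun_induction kLoopA with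
  | case1 k h heq ih =>
    rw [ih (by omega)]
    rw [List.drop_eq_getElem_cons h, List.drop_eq_getElem_cons (by omega : j + k < t.length)]
    rw [List.cons_prefix_cons]
    constructor
    · intro hp
      refine ⟨?_, by simpa [Nat.add_assoc] using hp⟩
      have h1 : p.getD k ' ' = p[k] := by simp [List.getD_eq_getElem?_getD, h]
      have h2 : t.getD (j+k) ' ' = t[j+k]'(by omega) := by
        simp [List.getD_eq_getElem?_getD]; rw [List.getElem?_eq_getElem (by omega)]; rfl
      rw [← h1, ← h2]; exact heq
    · intro ⟨h1, h2⟩; simpa [Nat.add_assoc] using h2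
  | case2 k h heq =>
    constructor
    · intro hkk; omega
    · intro hp
      exfalso
      rw [List.drop_eq_getElem_cons h, List.drop_eq_getElem_cons (by omega : j + k < t.length),
        List.cons_prefix_cons] at hp
      apply heq
      simp [List.getD_eq_getElem?_getD, h, List.getElem?_eq_getElem (show j+k < t.length by omega)]
      exact hp.1
  | case3 k h =>
    have : k = p.length := by omega
    subst this
    simp

-- A's j-loop is a first-match search
theorem jLoopA_eq_find? (p t : List Char) (js : List Nat) :
    jLoopA p t js = js.find? (fun j => decide (kLoopA p t j 0 = p.length)) := by
  induction js with
  | nil => rfl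
  | cons j rest ih => simp [jLoopA, List.find?_cons]; split_ifs with h <;> simp_all

theorem find?_congr' {α : Type} (l : List α) (p q : α → Bool) (h : ∀ x ∈ l, p x = q x) :
    l.find? p = l.find? q := by
  induction l with
  | nil => rfl
  | cons a t ih => simp [List.find?_cons, h a (by simp)]; split <;> simp_all

-- B's rolling-hash loop is the same first-match search (the hash invariant carried through)
theorem rkLoop_eq_find? (t p : List Char) (hple : p.length ≤ t.length)
    (cnt j : Nat) (h : Int)
    (hcnt : j + cnt = t.length - p.length + 1)
    (hh : h = hraw 0 ((t.drop j).take p.length) % 1000000007) :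
    rkLoop t p (hraw 0 p % 1000000007)
        (if 0 < p.length then (256 ^ (p.length - 1) : Int) % 1000000007 else 1) h j cnt
      = (List.range' j cnt).find? (fun j => decide ((t.drop j).take p.length = p)) := by
  induction cnt generalizing j h with
  | zero => rfl
  | succ cnt ih =>
    rw [rkLoop]
    have hslice : PySem.List.slice t (some (j : Int)) (some ((j : Int) + (p.length : Int)))
        = (t.drop j).take p.length := PySem.List.slice_natCast_add t j p.length
    have hrange : List.range' j (cnt + 1) = j :: List.range' (j + 1) cnt := rfl
    rw [hrange, List.find?_cons]
    by_cases hw : (t.drop j).take p.length = p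
    · have : h = hraw 0 p % 1000000007 := by rw [hh, hw]
      rw [if_pos ⟨this, by rw [hslice]; exact hw⟩]
      simp [hw]
    · rw [if_neg (by rw [hslice]; exact fun hc => hw hc.2)]
      simp only [hw, decide_false]
      cases cnt with
      | zero => rfl
      | succ cnt' =>
        have hm : 1 ≤ p.length := by
          by_contra hm0
          apply hw
          have : p.length = 0 := by omega
          rw [this, List.take_zero, (List.length_eq_zero_iff).mp this]
        have hjm : j + p.length < t.length := by omega
        have hnew : PySem.Int.mod ((h - ((t.getD j ' ').toNat : Int)
              * (if 0 < p.length then (256 ^ (p.length - 1) : Int) % 1000000007 else 1)) * 256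
              + ((t.getD (j + p.length) ' ').toNat : Int)) 1000000007
            = hraw 0 ((t.drop (j + 1)).take p.length) % 1000000007 := by
          rw [PySem.Int.mod_eq_emod_of_pos (by norm_num : (0:Int) < 1000000007), if_pos (show 0 < p.length from hm)]
          exact slide_eq t p.length j h hjm hm hh
        rw [if_pos hjm]
        exact ih (j + 1) _ (by omega) hnew

-- B's per-line search equals A's per-line scan
theorem line_eq (t p : List Char) :
    jLoopA p t (List.range (t.length + 1 - p.length))
      = (if p.length > t.length then none
         else rkLoop t p (hraw 0 p % 1000000007)
            (if 0 < p.length then (256 ^ (p.length - 1) : Int) % 1000000007 else 1)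
            ((PySem.List.slice t none (some ((p.length : Nat) : Int))).foldl hstep 0)
            0 (t.length - p.length + 1)) := by
  by_cases hgt : p.length > t.length
  · rw [if_pos hgt]
    have : t.length + 1 - p.length = 0 := by omega
    rw [this]
    rfl
  · rw [if_neg hgt]
    have hple : p.length ≤ t.length := by omega
    have hinit : (PySem.List.slice t none (some ((p.length : Nat) : Int))).foldl hstep 0
        = hraw 0 ((t.drop 0).take p.length) % 1000000007 := by
      rw [PySem.List.slice_to_natCast, List.drop_zero, foldl_hstep_zero]
    rw [rkLoop_eq_find? t p hple (t.length - p.length + 1) 0 _ (by omega) hinit]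
    rw [jLoopA_eq_find?]
    have hc : t.length + 1 - p.length = t.length - p.length + 1 := by omega
    rw [hc, List.range_eq_range']
    apply find?_congr'
    intro x hx
    have hxle : x + p.length ≤ t.length := by
      have := List.mem_range'.mp hx
      omega
    have hiff : kLoopA p t x 0 = p.length ↔ (t.drop x).take p.length = p := by
      rw [kLoopA_eq_length_iff p t x 0 (Nat.zero_le _) (by omega)]
      simp only [List.drop_zero, Nat.add_zero]
      rw [List.prefix_iff_eq_take]
      have : (t.drop x).take p.length = (t.drop x).take p.length := rfl
      constructor
      · intro hp; exact hp.symm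
      · intro hp; exact hp.symm
    simp [hiff]

theorem iLoop_eq (lines : List (List Char)) (p : List Char) (i : Nat) :
    iLoopA lines p i
      = iLoopB p (hraw 0 p % 1000000007)
          (if 0 < p.length then (256 ^ (p.length - 1) : Int) % 1000000007 else 1) lines i := by
  induction lines generalizing i with
  | nil => rfl
  | cons t rest ih =>
    rw [iLoopA, iLoopB, line_eq t p]
    by_cases hgt : p.length > t.length
    · simp only [if_pos hgt]
      exact ih (i + 1)
    · simp only [if_neg hgt]
      cases rkLoop t p (hraw 0 p % 1000000007)
          (if 0 < p.length then (256 ^ (p.length - 1) : Int) % 1000000007 else 1)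
          ((PySem.List.slice t none (some ((p.length : Nat) : Int))).foldl hstep 0)
          0 (t.length - p.length + 1) with
      | none => exact ih (i + 1)
      | some j => rfl

-- ===== VERDICT (by name: the statement is the Claim_ definition above) =====
theorem solve_spec : Claim_equal_solve := by
  intro textData pattern _
  unfold Spec_solve solve solve_alt
  simp only
  have h1 : pattern.toList.foldl hstep 0 = hraw 0 pattern.toList % 1000000007 :=
    foldl_hstep_zero _
  have h2 : (if 0 < pattern.toList.length then
        PySem.Int.powMod 256 (pattern.toList.length - 1) 1000000007 else 1)
      = (if 0 < pattern.toList.length then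
        (256 ^ (pattern.toList.length - 1) : Int) % 1000000007 else 1) := by
    split_ifs with hp
    · exact PySem.Int.powMod_eq_emod 256 _ (by norm_num : (0:Int) < 1000000007)
    · rfl
  rw [h1, h2]
  exact iLoop_eq _ _ _
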